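-- pv_equiv track=rewrite | github.com/taylor-swift-13/source2fsm | source2fsm/ir2Source.py | alter_duplicate
-- ===== SOURCE A (Python) =====
-- def alter_duplicate(lines):
--     update_lines =[]
--
--     for current_line in lines:
--         if current_line == "":
--             update_lines.append(current_line)
--             continue
--
--         for compare_line in update_lines:
--
--             if current_line==compare_line:
--                 current_line = compare_line[:-1]+' '+compare_line[-1]
--
--         update_lines.append(current_line)
--
--
--     return update_lines
-- ===== SOURCE B (Python) =====
-- def alter_duplicate(lines):
--     # Alternative strategy: index stored lines by value,
--     # and resolve via position jumps instead of scanning the whole output list.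
--     out = []
--     index = {}  # value -> increasing list of positions in out
--     for line in lines:
--         cur = line
--         if cur != "":
--             pos = 0
--             while True:
--                 ps = index.get(cur)
--                 nxt = None
--                 if ps is not None:
--                     for p in ps:
--                         if p >= pos:
--                             nxt = p
--                             break
--                 if nxt is None:
--                     break
--                 pos = nxt + 1
--                 cur = cur[:-1] + ' ' + cur[-1]
--         index.setdefault(cur, []).append(len(out))
--         out.append(cur)
--     return out
-- ===== Notes on version B (the rewrite author's own statement) =====
-- stated objective: alternative
-- what changed: Instead of rescanning the whole output list for every new line, B keeps a dict from each stored value to its increasing list of positions and resolves a line by jumping to the next matching position of the evolving value.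
import Mathlib
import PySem

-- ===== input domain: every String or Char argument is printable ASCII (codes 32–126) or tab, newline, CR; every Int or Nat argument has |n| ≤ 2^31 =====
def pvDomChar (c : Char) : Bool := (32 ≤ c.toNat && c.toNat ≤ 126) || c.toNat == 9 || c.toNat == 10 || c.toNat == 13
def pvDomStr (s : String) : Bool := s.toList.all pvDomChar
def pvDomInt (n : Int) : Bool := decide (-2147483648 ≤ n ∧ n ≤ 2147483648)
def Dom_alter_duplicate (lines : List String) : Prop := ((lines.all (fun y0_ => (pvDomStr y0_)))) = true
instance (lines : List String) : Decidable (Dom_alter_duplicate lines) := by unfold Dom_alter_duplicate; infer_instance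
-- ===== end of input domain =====

-- B replaces A's rescan of the whole output list for every line by a dict mapping
-- each stored value to its (increasing) list of positions, jumping straight to the
-- next matching position of the evolving value (objective: alternative).

-- ===== PORT A =====
-- compare_line[:-1] + ' ' + compare_line[-1]; exact for nonempty strings,
-- and both ports only apply it to a string that matched a previous (hence nonempty) line.
def pvSpaced (s : String) : String :=
  String.ofList (s.toList.dropLast ++ ' ' :: (s.toList.getLast?.elim [] (fun c => [c])))

def alter_duplicate (lines : List String) : List String :=
  lines.foldl (fun update_lines current_line =>
    if current_line == "" then update_lines ++ [current_line]
    else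
      update_lines ++ [update_lines.foldl (fun cur compare_line =>
        if cur == compare_line then pvSpaced compare_line else cur) current_line]) []

-- ===== PORT B =====
-- first element of ps that is ≥ pos (the inner `for p in ps: if p >= pos: …` of Source B)
def pvFindGe (ps : List Nat) (pos : Nat) : Option Nat :=
  match ps with
  | [] => none
  | p :: rest => if pos ≤ p then some p else pvFindGe rest pos

-- Source B's `while True` loop; fuel (out.length + 1) only makes the recursion structural:
-- pos strictly increases each round and positions are < out.length, so it never runs out.
def pvResolve (index : PySem.Dict String (List Nat)) (cur : String) (pos : Nat) (fuel : Nat) : String :=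
  match fuel with
  | 0 => cur
  | Nat.succ fuel' =>
    match pvFindGe (index.getD cur []) pos with
    | none => cur
    | some p => pvResolve index (pvSpaced cur) (p + 1) fuel'

def alter_duplicate_alt (lines : List String) : List String :=
  (lines.foldl (fun (st : PySem.Dict String (List Nat) × List String) line =>
    let index := st.1
    let out := st.2
    let cur := if line == "" then line else pvResolve index line 0 (out.length + 1)
    (index.insert cur (index.getD cur [] ++ [out.length]), out ++ [cur]))
    (PySem.Dict.empty, [])).2

-- ===== PRECONDITION & SPEC =====
def Spec_alter_duplicate (lines : List String) (out : List String) : Prop := out = alter_duplicate_alt lines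
instance (lines : List String) (out : List String) : Decidable (Spec_alter_duplicate lines out) := by unfold Spec_alter_duplicate; infer_instance

-- ===== CLAIM (what is proved, stated in full; the proofs are below) =====
def Claim_equal_alter_duplicate : Prop := ∀ (lines : List String), Dom_alter_duplicate lines → Spec_alter_duplicate lines (alter_duplicate lines)

-- ===== LEMMAS AND PROOFS =====

-- A's inner loop over the already-produced lines
def pvScan (ls : List String) (cur : String) : String :=
  ls.foldl (fun c x => if c == x then pvSpaced x else c) cur

-- the positions (in increasing order) at which v occurs in out
def pvPos (out : List String) (v : String) : List Nat :=
  (List.range out.length).filter (fun i => out[i]? == some v)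

-- the invariant tying B's dict to A's output list
def pvInv (index : PySem.Dict String (List Nat)) (out : List String) : Prop :=
  ∀ v, index.getD v [] = pvPos out v

lemma pvMem_pos {out : List String} {v : String} {q : Nat} :
    q ∈ pvPos out v ↔ out[q]? = some v := by
  simp only [pvPos, List.mem_filter, List.mem_range, beq_iff_eq]
  constructor
  · exact fun h => h.2
  · intro h
    exact ⟨(List.getElem?_eq_some_iff.mp h).1, h⟩

lemma pvPos_sorted (out : List String) (v : String) : (pvPos out v).Pairwise (· < ·) :=
  List.Pairwise.filter _ (List.pairwise_lt_range)

lemma pvPos_append (out : List String) (c v : String) :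
    pvPos (out ++ [c]) v = pvPos out v ++ (if c = v then [out.length] else []) := by
  simp only [pvPos, List.length_append, List.length_cons, List.length_nil, List.range_succ,
    List.filter_append]
  congr 1
  · apply List.filter_congr
    intro i hi
    rw [List.mem_range] at hi
    rw [List.getElem?_append_left hi]
  · rw [List.filter_singleton]
    simp

lemma pvFindGe_none {ps : List Nat} {pos : Nat} :
    pvFindGe ps pos = none ↔ ∀ q ∈ ps, q < pos := by
  induction ps with
  | nil => simp [pvFindGe]
  | cons p rest ih =>
    simp only [pvFindGe]
    split <;> simp_all

lemma pvFindGe_some {ps : List Nat} {pos q : Nat} (hs : ps.Pairwise (· < ·))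
    (h : pvFindGe ps pos = some q) :
    q ∈ ps ∧ pos ≤ q ∧ ∀ r ∈ ps, pos ≤ r → q ≤ r := by
  induction ps with
  | nil => simp [pvFindGe] at h
  | cons p rest ih =>
    rw [List.pairwise_cons] at hs
    simp only [pvFindGe] at h
    split at h
    · cases h
      refine ⟨List.mem_cons_self, by assumption, ?_⟩
      intro r hr _
      rcases List.mem_cons.mp hr with h' | h'
      · omega
      · exact le_of_lt (hs.1 r h')
    · obtain ⟨h1, h2, h3⟩ := ih hs.2 h
      refine ⟨List.mem_cons_of_mem _ h1, h2, ?_⟩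
      intro r hr hpr
      rcases List.mem_cons.mp hr with h' | h'
      · omega
      · exact h3 r h' hpr

lemma pvScan_no_match {ls : List String} {cur : String} (h : ∀ x ∈ ls, x ≠ cur) :
    pvScan ls cur = cur := by
  induction ls with
  | nil => rfl
  | cons x xs ih =>
    simp only [pvScan, List.foldl_cons]
    have hx : ¬ (cur == x) = true := by
      simp only [beq_iff_eq]
      exact fun hc => (h x List.mem_cons_self) hc.symm
    rw [if_neg hx]
    exact ih (fun y hy => h y (List.mem_cons_of_mem _ hy))

lemma pvScan_append (l1 l2 : List String) (cur : String) :
    pvScan (l1 ++ l2) cur = pvScan l2 (pvScan l1 cur) :=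
  List.foldl_append

lemma pvScan_drop_step {out : List String} {cur : String} {p q : Nat}
    (hq : out[q]? = some cur) (hpq : p ≤ q)
    (hmin : ∀ r, p ≤ r → r < q → out[r]? ≠ some cur) :
    pvScan (out.drop p) cur = pvScan (out.drop (q + 1)) (pvSpaced cur) := by
  have hqlt : q < out.length := (List.getElem?_eq_some_iff.mp hq).1
  have hdq : out.drop q = cur :: out.drop (q + 1) := by
    rw [List.drop_eq_getElem_cons hqlt]
    congr 1
    have := (List.getElem?_eq_some_iff.mp hq).2
    simpa using this
  have hsplit : out.drop p = (out.drop p).take (q - p) ++ out.drop q := by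
    conv_lhs => rw [← List.take_append_drop (q - p) (out.drop p)]
    rw [List.drop_drop, Nat.add_sub_cancel' hpq]
  rw [hsplit, hdq, pvScan_append]
  have hno : pvScan ((out.drop p).take (q - p)) cur = cur := by
    apply pvScan_no_match
    intro x hx
    obtain ⟨j, hj, hget⟩ := List.getElem_of_mem hx
    have hjlt : j < q - p := lt_of_lt_of_le hj (by simp)
    rw [List.getElem_take, List.getElem_drop] at hget
    intro hcur
    apply hmin (p + j) (Nat.le_add_right _ _) (by omega)
    rw [List.getElem?_eq_some_iff]
    exact ⟨by omega, hget.trans hcur⟩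
  rw [hno]
  simp [pvScan, List.foldl_cons]

lemma pvResolve_eq_scan {index : PySem.Dict String (List Nat)} {out : List String}
    (hInv : pvInv index out) :
    ∀ (fuel : Nat) (cur : String) (p : Nat), out.length ≤ p + fuel →
      pvResolve index cur p fuel = pvScan (out.drop p) cur := by
  intro fuel
  induction fuel with
  | zero =>
    intro cur p hp
    rw [List.drop_eq_nil_of_le (by omega)]
    rfl
  | succ fuel' ih =>
    intro cur p hp
    simp only [pvResolve]
    rw [hInv cur]
    cases h : pvFindGe (pvPos out cur) p with
    | none =>
      rw [pvFindGe_none] at h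
      rw [pvScan_no_match]
      intro x hx hxcur
      subst hxcur
      obtain ⟨j, hj⟩ := List.mem_iff_getElem?.mp hx
      rw [List.getElem?_drop] at hj
      have hmem : p + j ∈ pvPos out x := pvMem_pos.mpr hj
      have := h _ hmem
      omega
    | some q =>
      obtain ⟨hqmem, hpq, hqmin⟩ := pvFindGe_some (pvPos_sorted out cur) h
      have hq : out[q]? = some cur := pvMem_pos.mp hqmem
      have hqlt : q < out.length := (List.getElem?_eq_some_iff.mp hq).1
      rw [pvScan_drop_step hq hpq ?hmin]
      · exact ih (pvSpaced cur) (q + 1) (by omega)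
      case hmin =>
        intro r hpr hrq hr
        have := hqmin r (pvMem_pos.mpr hr) hpr
        omega

-- B's loop body, named for the induction
def pvStepB (st : PySem.Dict String (List Nat) × List String) (line : String) :
    PySem.Dict String (List Nat) × List String :=
  let index := st.1
  let out := st.2
  let cur := if line == "" then line else pvResolve index line 0 (out.length + 1)
  (index.insert cur (index.getD cur [] ++ [out.length]), out ++ [cur])

lemma pvInv_step {index : PySem.Dict String (List Nat)} {out : List String}
    (hInv : pvInv index out) (cur : String) :
    pvInv (index.insert cur (index.getD cur [] ++ [out.length])) (out ++ [cur]) := by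
  intro v
  rw [PySem.Dict.getD_insert, pvPos_append, hInv cur, hInv v]
  rcases eq_or_ne v cur with h | h
  · simp [h]
  · simp [h, Ne.symm h]

lemma pvMain : ∀ (lines : List String) (index : PySem.Dict String (List Nat)) (out : List String),
    pvInv index out →
    lines.foldl (fun update_lines current_line =>
      if current_line == "" then update_lines ++ [current_line]
      else
        update_lines ++ [update_lines.foldl (fun cur compare_line =>
          if cur == compare_line then pvSpaced compare_line else cur) current_line]) out
    = (lines.foldl pvStepB (index, out)).2 := by
  intro lines
  induction lines with
  | nil => intro index out _; rfl
  | cons l ls ih =>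
    intro index out hInv
    simp only [List.foldl_cons]
    by_cases hl : l = ""
    · subst hl
      rw [if_pos (by simp : (("" : String) == "") = true)]
      have : pvStepB (index, out) "" =
          (index.insert "" (index.getD "" [] ++ [out.length]), out ++ [""]) := by
        simp [pvStepB]
      rw [this]
      exact ih _ _ (pvInv_step hInv "")
    · rw [if_neg (by simpa using hl)]
      have hres : pvResolve index l 0 (out.length + 1) = pvScan out l := by
        have := pvResolve_eq_scan hInv (out.length + 1) l 0 (by omega)
        simpa using this
      have : pvStepB (index, out) l =
          (index.insert (pvScan out l) (index.getD (pvScan out l) [] ++ [out.length]),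
            out ++ [pvScan out l]) := by
        simp only [pvStepB]
        rw [if_neg (by simpa using hl), hres]
      rw [this]
      exact ih _ _ (pvInv_step hInv (pvScan out l))

lemma pvInv_empty : pvInv PySem.Dict.empty [] := by
  intro v
  simp [PySem.Dict.getD_empty, pvPos]

-- ===== VERDICT (by name: the statement is the Claim_ definition above) =====
theorem alter_duplicate_spec : Claim_equal_alter_duplicate := by
  intro lines _
  unfold Spec_alter_duplicate alter_duplicate alter_duplicate_alt
  have := pvMain lines PySem.Dict.empty [] pvInv_empty
  rw [this]
  rfl
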